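-- pv_equiv track=rewrite | github.com/AkshayAD/AI-Data-Analaysis-31Aug | src/python/ai_personas.py | _parse_tasks
-- ===== SOURCE A (Python) =====
-- from typing import Dict, List, Optional, Any
--
-- def _parse_tasks(response: str) -> List[str]:
--     """Parse individual tasks from response"""
--     tasks = []
--     lines = response.split('\n')
--     current_task = []
--
--     for line in lines:
--         if line.strip().startswith('TASK'):
--             if current_task:
--                 tasks.append('\n'.join(current_task).strip())
--             current_task = [line]
--         elif current_task:
--             current_task.append(line)
--
--     if current_task:
--         tasks.append('\n'.join(current_task).strip())
--
--     return tasks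
-- ===== SOURCE B (Python) =====
-- from typing import List
--
-- def _parse_tasks(response: str) -> List[str]:
--     """Parse individual tasks from response (two-pointer block scan)."""
--     lines = response.split('\n')
--     n = len(lines)
--     tasks = []
--     i = 0
--     while i < n and not lines[i].strip().startswith('TASK'):
--         i += 1
--     while i < n:
--         j = i + 1
--         while j < n and not lines[j].strip().startswith('TASK'):
--             j += 1
--         tasks.append('\n'.join(lines[i:j]).strip())
--         i = j
--     return tasks
-- ===== Notes on version B (the rewrite author's own statement) =====
-- stated objective: alternative
-- what changed: Replaced A's single stateful accumulator loop (current_task buffer flushed on each TASK boundary plus a trailing flush) by a two-pointer block scan: skip to the first TASK line, then repeatedly find the next TASK boundary and emit the joined slice between boundaries, with no buffer or trailing flush.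
import Mathlib
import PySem

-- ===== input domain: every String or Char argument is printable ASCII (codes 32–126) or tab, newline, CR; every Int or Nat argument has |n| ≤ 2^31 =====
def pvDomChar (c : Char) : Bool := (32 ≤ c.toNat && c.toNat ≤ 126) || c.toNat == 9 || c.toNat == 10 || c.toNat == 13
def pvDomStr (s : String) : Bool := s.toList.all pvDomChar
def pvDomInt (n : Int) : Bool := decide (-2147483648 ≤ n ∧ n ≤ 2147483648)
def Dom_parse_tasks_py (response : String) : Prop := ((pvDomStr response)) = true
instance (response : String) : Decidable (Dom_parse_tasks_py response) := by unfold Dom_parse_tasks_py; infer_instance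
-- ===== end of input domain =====

-- B replaces A's stateful accumulator loop by a two-pointer block scan (skip to first TASK, then emit slice
-- between consecutive TASK boundaries); same cost, alternative decomposition. Return-value equivalence only.

-- ===== PORT A =====
-- shared predicate: line.strip().startswith('TASK')
def pvIsTask (l : String) : Bool := PySem.Str.startswith (PySem.Str.strip l) "TASK"
-- '\n'.join(cur).strip()
def pvEmit (cur : List String) : String := PySem.Str.strip (PySem.Str.join "\n" cur)
-- A's loop body on state (tasks, current_task)
def pvStep (st : List String × List String) (line : String) : List String × List String :=
  if pvIsTask line then
    ((if st.2 = [] then st.1 else st.1 ++ [pvEmit st.2]), [line])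
  else if st.2 = [] then st else (st.1, st.2 ++ [line])
-- A's trailing flush
def pvFinish (st : List String × List String) : List String :=
  if st.2 = [] then st.1 else st.1 ++ [pvEmit st.2]

def parse_tasks_py (response : String) : List String :=
  pvFinish ((((PySem.Str.split? response "\n").getD [])).foldl pvStep ([], []))

-- ===== PORT B =====
-- Source B's two-pointer scan: leading skip = the non-TASK branch; the inner boundary search = takeWhile/dropWhile
def pvAltBlocks : List String → List String
  | [] => []
  | l :: ls =>
    if pvIsTask l then
      pvEmit (l :: ls.takeWhile (fun x => !pvIsTask x))
        :: pvAltBlocks (ls.dropWhile (fun x => !pvIsTask x))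
    else pvAltBlocks ls
termination_by ls => ls.length
decreasing_by
  · have := List.length_dropWhile_le (fun x => !pvIsTask x) ls
    simpa using Nat.lt_succ_of_le this
  · simp

def parse_tasks_py_alt (response : String) : List String :=
  pvAltBlocks (((PySem.Str.split? response "\n").getD []))

-- ===== PRECONDITION & SPEC =====
def Spec_parse_tasks_py (response : String) (out : List String) : Prop := out = parse_tasks_py_alt response
instance (response : String) (out : List String) : Decidable (Spec_parse_tasks_py response out) := by unfold Spec_parse_tasks_py; infer_instance

-- ===== CLAIM (what is proved, stated in full; the proofs are below) =====
def Claim_equal_parse_tasks_py : Prop := ∀ (response : String), Dom_parse_tasks_py response → Spec_parse_tasks_py response (parse_tasks_py response)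

-- ===== LEMMAS AND PROOFS =====

-- invariant of A's loop when the buffer is nonempty: it will emit the buffer extended by the lines up to
-- the next TASK boundary, then behave like B on the rest
theorem pvFold_cons_ne (ls : List String) : ∀ (tasks cur : List String), cur ≠ [] →
    pvFinish (ls.foldl pvStep (tasks, cur)) =
      tasks ++ pvEmit (cur ++ ls.takeWhile (fun x => !pvIsTask x))
        :: pvAltBlocks (ls.dropWhile (fun x => !pvIsTask x)) := by
  induction ls with
  | nil =>
    intro tasks cur h
    simp [pvFinish, pvAltBlocks, h]
  | cons l ls ih =>
    intro tasks cur h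
    by_cases hT : pvIsTask l
    · have hstep : pvStep (tasks, cur) l = (tasks ++ [pvEmit cur], [l]) := by
        simp [pvStep, hT, h]
      rw [List.foldl_cons, hstep, ih _ [l] (by simp)]
      simp [pvAltBlocks, hT]
    · have hstep : pvStep (tasks, cur) l = (tasks, cur ++ [l]) := by
        simp [pvStep, hT, h]
      rw [List.foldl_cons, hstep, ih tasks (cur ++ [l]) (by simp)]
      simp [hT]

-- A's loop from an empty buffer computes exactly B's block list
theorem pvFold_nil (ls : List String) : ∀ (tasks : List String),
    pvFinish (ls.foldl pvStep (tasks, [])) = tasks ++ pvAltBlocks ls := by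
  induction ls with
  | nil => intro tasks; simp [pvFinish, pvAltBlocks]
  | cons l ls ih =>
    intro tasks
    by_cases hT : pvIsTask l
    · have hstep : pvStep (tasks, []) l = (tasks, [l]) := by
        simp [pvStep, hT]
      rw [List.foldl_cons, hstep, pvFold_cons_ne ls tasks [l] (by simp)]
      simp [pvAltBlocks, hT]
    · have hstep : pvStep (tasks, []) l = (tasks, []) := by
        simp [pvStep, hT]
      rw [List.foldl_cons, hstep, ih tasks]
      simp [pvAltBlocks, hT]

-- ===== VERDICT (by name: the statement is the Claim_ definition above) =====
theorem parse_tasks_py_spec : Claim_equal_parse_tasks_py := by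
  intro response _
  unfold Spec_parse_tasks_py parse_tasks_py parse_tasks_py_alt
  simpa using pvFold_nil (((PySem.Str.split? response "\n").getD [])) []
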